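-- pv_equiv track=rewrite | github.com/rebuilder945/FL_research | ast_research/python_code_5.23/lastterm_page7/success_code/李响-3225-2023-05-22_14_31_52.py | work
-- ===== SOURCE A (Python) =====
-- def work(a) :
--    s = 1
--    t = 1
--    b = {0:1}
--    for x in range(1,a+1):
--       s= x*s
--       b[x] = s
--    return b
-- ===== SOURCE B (Python) =====
-- def work(a):
--     def fact(n):
--         p = 1
--         for i in range(2, n + 1):
--             p *= i
--         return p
--     return {x: fact(x) for x in range(max(a, 0) + 1)}
-- ===== Notes on version B (the rewrite author's own statement) =====
-- stated objective: idiomatic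
-- what changed: B replaces A's imperative loop with a running-product accumulator by a single dict comprehension over range(max(a,0)+1) whose values come from an independent recursive factorial helper.
import Mathlib
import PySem

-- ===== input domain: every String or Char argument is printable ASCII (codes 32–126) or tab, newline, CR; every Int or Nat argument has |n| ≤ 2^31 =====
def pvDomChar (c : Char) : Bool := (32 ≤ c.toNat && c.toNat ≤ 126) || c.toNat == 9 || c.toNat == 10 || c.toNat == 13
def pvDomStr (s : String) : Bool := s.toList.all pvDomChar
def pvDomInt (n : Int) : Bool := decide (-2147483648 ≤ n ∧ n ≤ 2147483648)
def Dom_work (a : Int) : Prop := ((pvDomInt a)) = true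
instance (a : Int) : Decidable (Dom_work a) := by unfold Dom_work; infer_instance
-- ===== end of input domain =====

-- B builds the dict in one comprehension over range(max(a,0)+1), computing each value with a
-- recursive factorial, instead of A's imperative loop carrying a running product; alternative decomposition, same values.
-- ===== PORT A =====
def work (a : Int) : List (Int × Int) :=
  ((PySem.List.pyRange 1 (a + 1) 1).foldl
      (fun (st : Int × PySem.Dict Int Int) x => (x * st.1, st.2.insert x (x * st.1)))
      (1, PySem.Dict.ofList [((0 : Int), (1 : Int))])).2.items

-- ===== PORT B =====
-- B's helper `fact`: product loop over range(2, n+1)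
def pyFact (n : Int) : Int :=
  (PySem.List.pyRange 2 (n + 1) 1).foldl (fun p i => p * i) 1

def work_alt (a : Int) : List (Int × Int) :=
  (PySem.Dict.ofList
      ((PySem.List.pyRange 0 (max a 0 + 1) 1).map (fun x => (x, pyFact x)))).items

-- ===== PRECONDITION & SPEC =====
def Spec_work (a : Int) (out : List (Int × Int)) : Prop := out = work_alt a
instance (a : Int) (out : List (Int × Int)) : Decidable (Spec_work a out) := by unfold Spec_work; infer_instance

-- ===== CLAIM (what is proved, stated in full; the proofs are below) =====
def Claim_equal_work : Prop := ∀ (a : Int), Dom_work a → Spec_work a (work a)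

-- ===== LEMMAS AND PROOFS =====

lemma pyFact_zero : pyFact 0 = 1 := by
  unfold pyFact
  rw [PySem.List.pyRange_one_eq_nil (by norm_num)]
  rfl

lemma pyFact_succ (m : Nat) : pyFact ((m : Int) + 1) = ((m : Int) + 1) * pyFact m := by
  unfold pyFact
  rcases Nat.eq_zero_or_pos m with h0 | hpos
  · subst h0
    rw [PySem.List.pyRange_one_eq_nil (by norm_num : ((0:Nat):Int) + 1 + 1 ≤ 2),
        PySem.List.pyRange_one_eq_nil (by norm_num : ((0:Nat):Int) + 1 ≤ 2)]
    norm_num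
  · rw [show ((m : Int) + 1 + 1) = ((m : Int) + 1) + 1 by ring,
        PySem.List.pyRange_one_succ_right (by omega : (2:Int) ≤ (m : Int) + 1),
        List.foldl_append]
    simp only [List.foldl_cons, List.foldl_nil]
    ring

-- A's running state after processing 1..n: the accumulator is n! and the dict is B's insert loop
lemma state_eq (n : Nat) :
    (PySem.List.pyRange 1 ((n : Int) + 1) 1).foldl
        (fun (st : Int × PySem.Dict Int Int) x => (x * st.1, st.2.insert x (x * st.1)))
        (1, PySem.Dict.empty.insert 0 1)
      = (pyFact n,
         (PySem.List.pyRange 1 ((n : Int) + 1) 1).foldl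
           (fun (d : PySem.Dict Int Int) x => d.insert x (pyFact x))
           (PySem.Dict.empty.insert 0 1)) := by
  induction n with
  | zero =>
    rw [PySem.List.pyRange_one_eq_nil (by norm_num : ((0:Nat):Int) + 1 ≤ 1)]
    simp only [List.foldl_nil, Nat.cast_zero, pyFact_zero]
  | succ m ih =>
    have h : PySem.List.pyRange 1 (((m + 1 : Nat) : Int) + 1) 1
        = PySem.List.pyRange 1 (((m : Nat) : Int) + 1) 1 ++ [((m : Nat) : Int) + 1] := by
      have := PySem.List.pyRange_one_succ_right (a := 1) (b := ((m : Nat) : Int) + 1)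
        (by omega)
      rw [show (((m + 1 : Nat) : Int) + 1) = (((m : Nat) : Int) + 1) + 1 by push_cast; ring]
      exact this
    rw [h, List.foldl_append, List.foldl_append, ih]
    simp only [List.foldl_cons, List.foldl_nil]
    rw [← pyFact_succ]
    push_cast
    ring_nf

-- ===== VERDICT (by name: the statement is the Claim_ definition above) =====
theorem work_spec : Claim_equal_work := by
  intro a _
  unfold Spec_work work work_alt
  simp only [PySem.Dict.ofList, PySem.Dict.update, List.foldl_map]
  by_cases h : a ≤ 0
  · rw [PySem.List.pyRange_one_eq_nil (by omega : a + 1 ≤ 1),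
        show max a 0 = 0 by omega,
        PySem.List.pyRange_one_singleton]
    simp only [List.foldl_nil, List.foldl_cons, pyFact_zero]
  · have ha : a = ((a.toNat : Nat) : Int) := by omega
    rw [show max a 0 = a by omega,
        PySem.List.pyRange_one_cons (by omega : (0:Int) < a + 1)]
    simp only [List.foldl_cons, List.foldl_nil, pyFact_zero, zero_add]
    rw [ha, state_eq]
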